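-- pv_equiv track=rewrite | github.com/AdminFinstack-Tech/FSRFPGenie | backend/services.py | _generate_highlight
-- ===== SOURCE A (Python) =====
-- def _generate_highlight(query: str, text: str) -> str:
--     """Generate highlighted snippet"""
--     # Simple implementation - find query terms in text
--     query_terms = query.lower().split()
--     text_lower = text.lower()
--
--     # Find best matching portion
--     best_start = 0
--     best_score = 0
--
--     words = text.split()
--     for i in range(len(words) - 5):
--         window = ' '.join(words[i:i+10])
--         score = sum(1 for term in query_terms if term in window.lower())
--         if score > best_score:
--             best_score = score
--             best_start = i
--
--     # Return highlighted portion
--     if best_score > 0: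
--         snippet = ' '.join(words[best_start:best_start+20])
--         for term in query_terms:
--             snippet = snippet.replace(term, f"**{term}**")
--         return f"...{snippet}..."
--
--     return text[:200] + "..."
-- ===== SOURCE B (Python) =====
-- def _generate_highlight(query: str, text: str) -> str:
--     """Generate highlighted snippet"""
--     terms = query.lower().split()
--     words = text.split()
--     m = len(words) - 5
--     # Inverted scatter: each matching word stamps the range of window starts it serves,
--     # instead of scanning the contents of every window.
--     score = [0] * m
--     for t in terms:
--         starts = set()
--         for p, w in enumerate(words):
--             if t in w.lower():
--                 starts.update(range(max(p - 9, 0), min(p, m - 1) + 1))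
--         for i in starts:
--             score[i] += 1
--     best_start = 0
--     best_score = 0
--     for i in range(m):
--         if score[i] > best_score:
--             best_score = score[i]
--             best_start = i
--     if best_score > 0:
--         snippet = ' '.join(words[best_start:best_start + 20])
--         for t in terms:
--             snippet = snippet.replace(t, f"**{t}**")
--         return f"...{snippet}..."
--     return text[:200] + "..."
-- ===== Notes on version B (the rewrite author's own statement) =====
-- stated objective: alternative
-- what changed: B inverts the computation: instead of A's per-window gather (join 10 words, substring-scan for every term), each matching word scatters +1 over the set of window starts it serves (an interval of at most 10 starts, deduplicated per term with a set), producing the whole score array in one pass per term; the best window is then a plain first-max scan over that array.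
import Mathlib
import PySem

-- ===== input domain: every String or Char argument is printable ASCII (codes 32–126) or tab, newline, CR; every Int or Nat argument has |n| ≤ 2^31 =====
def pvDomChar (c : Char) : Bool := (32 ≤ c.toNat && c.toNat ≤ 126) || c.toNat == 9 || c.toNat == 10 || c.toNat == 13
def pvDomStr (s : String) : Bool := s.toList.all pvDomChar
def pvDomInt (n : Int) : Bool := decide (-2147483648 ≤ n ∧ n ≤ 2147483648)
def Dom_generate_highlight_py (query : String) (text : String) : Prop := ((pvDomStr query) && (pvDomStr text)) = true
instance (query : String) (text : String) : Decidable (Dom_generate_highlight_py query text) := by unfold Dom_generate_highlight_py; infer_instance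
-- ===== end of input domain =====

-- B inverts A's per-window gather (join 10 words, substring-scan every term) into a per-match
-- scatter: each matching word stamps the interval of window starts it serves into a per-term set,
-- the score array is accumulated once, and the best window is a plain first-max scan
-- (objective: alternative; equal return values proved for all inputs).

-- ===== PORT A =====
-- (A also computes `text_lower = text.lower()` but never uses it; the dead binding is omitted.)
def generate_highlight_py (query : String) (text : String) : String :=
  let query_terms := PySem.Str.split₀ (PySem.Str.lower query)
  let words := PySem.Str.split₀ text
  let res := (PySem.List.pyRange 0 ((words.length : Int) - 5) 1).foldl
    (fun (p : Int × Int) i =>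
      let window := PySem.Str.join " " (PySem.List.slice words (some i) (some (i + 10)))
      let score := (query_terms.map
        (fun term => if PySem.Str.isIn term (PySem.Str.lower window) then (1 : Int) else 0)).sum
      if score > p.2 then (i, score) else p)
    ((0 : Int), (0 : Int))
  let best_start := res.1
  let best_score := res.2
  if best_score > 0 then
    let snippet0 := PySem.Str.join " " (PySem.List.slice words (some best_start) (some (best_start + 20)))
    let snippet := query_terms.foldl
      (fun s term => PySem.Str.replace s term ("**" ++ term ++ "**")) snippet0
    "..." ++ snippet ++ "..."
  else
    PySem.Str.slice text none (some 200) ++ "..."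

-- ===== PORT B =====
def generate_highlight_py_alt (query : String) (text : String) : String :=
  let terms := PySem.Str.split₀ (PySem.Str.lower query)
  let words := PySem.Str.split₀ text
  let m : Int := (words.length : Int) - 5
  -- [0] * m : Python list-repeat treats a negative count as 0
  let score0 : List Int := List.replicate m.toNat 0
  let score := terms.foldl (fun sc t =>
    let starts : PySem.Set Int := (PySem.List.enumerate words).foldl
      (fun st pw =>
        if PySem.Str.isIn t (PySem.Str.lower pw.2) then
          PySem.Set.update st (PySem.List.pyRange (max (pw.1 - 9) 0) (min pw.1 (m - 1) + 1) 1)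
        else st)
      PySem.Set.empty
    -- 'for i in starts: score[i] += 1' — increments commute, so the set's iteration order is immaterial
    starts.foldl (fun sc i => PySem.List.pySetD sc i (PySem.List.pyGetD sc i 0 + 1)) sc) score0
  let res := (PySem.List.pyRange 0 m 1).foldl
    (fun (p : Int × Int) i =>
      let s := PySem.List.pyGetD score i 0   -- score[i]; 0 ≤ i < m = len(score) on this range
      if s > p.2 then (i, s) else p)
    ((0 : Int), (0 : Int))
  let best_start := res.1
  let best_score := res.2
  if best_score > 0 then
    let snippet0 := PySem.Str.join " " (PySem.List.slice words (some best_start) (some (best_start + 20)))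
    let snippet := terms.foldl
      (fun s term => PySem.Str.replace s term ("**" ++ term ++ "**")) snippet0
    "..." ++ snippet ++ "..."
  else
    PySem.Str.slice text none (some 200) ++ "..."

-- ===== PRECONDITION & SPEC =====
def Spec_generate_highlight_py (query : String) (text : String) (out : String) : Prop := out = generate_highlight_py_alt query text
instance (query : String) (text : String) (out : String) : Decidable (Spec_generate_highlight_py query text out) := by unfold Spec_generate_highlight_py; infer_instance

-- ===== CLAIM (what is proved, stated in full; the proofs are below) =====
def Claim_equal_generate_highlight_py : Prop := ∀ (query : String) (text : String), Dom_generate_highlight_py query text → Spec_generate_highlight_py query text (generate_highlight_py query text)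

-- ===== LEMMAS AND PROOFS =====

-- tokens of split₀ are nonempty and whitespace-free
theorem pvTokGo (s : List Char) : ∀ (cur : List Char) (acc : List (List Char)),
    (∀ u ∈ acc, u ≠ [] ∧ ∀ c ∈ u, PySem.Chars.isspace c = false) →
    (∀ c ∈ cur, PySem.Chars.isspace c = false) →
    ∀ t ∈ PySem.Chars.split₀.go s cur acc, t ≠ [] ∧ ∀ c ∈ t, PySem.Chars.isspace c = false := by
  induction s with
  | nil =>
    intro cur acc hacc hcur t ht
    simp only [PySem.Chars.split₀.go] at ht
    split at ht
    · exact hacc t (by simpa using ht)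
    · rename_i hne
      have ht' : t ∈ acc ∨ t = cur.reverse := by simpa using ht
      rcases ht' with h | h
      · exact hacc t h
      · subst h
        constructor
        · simpa using fun h => hne (by simp [h])
        · intro c hc; exact hcur c (by simpa using hc)
  | cons c rest ih =>
    intro cur acc hacc hcur t ht
    simp only [PySem.Chars.split₀.go] at ht
    split at ht
    · split at ht
      · exact ih [] acc hacc (by simp) t ht
      · rename_i hsp hne
        refine ih [] (cur.reverse :: acc) ?_ (by simp) t ht
        intro u hu
        have hu' : u = cur.reverse ∨ u ∈ acc := by simpa using hu
        rcases hu' with h | h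
        · subst h
          constructor
          · simpa using fun h => hne (by simp [h])
          · intro d hd; exact hcur d (by simpa using hd)
        · exact hacc u h
    · rename_i hns
      refine ih (c :: cur) acc hacc ?_ t ht
      intro d hd
      have hd' : d = c ∨ d ∈ cur := by simpa using hd
      rcases hd' with h | h
      · subst h; simpa using hns
      · exact hcur d h

theorem pvTok (s t : List Char) (ht : t ∈ PySem.Chars.split₀ s) :
    t ≠ [] ∧ ∀ c ∈ t, PySem.Chars.isspace c = false := by
  have := pvTokGo s [] [] (by simp) (by simp)
  exact this t (by simpa [PySem.Chars.split₀] using ht)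

theorem pvPrefixSplit (t u v : List Char) (c : Char) (hc : c ∉ t)
    (h : t <+: u ++ c :: v) : t <+: u := by
  by_cases hl : t.length ≤ u.length
  · exact List.prefix_of_prefix_length_le h (List.prefix_append _ _) hl
  · exfalso
    rw [not_le] at hl
    have : t[u.length]? = (u ++ c :: v)[u.length]? := by
      rcases h with ⟨r, hr⟩
      rw [← hr, List.getElem?_append_left (by omega)]
    have h2 : (u ++ c :: v)[u.length]? = some c := by
      rw [List.getElem?_append_right (le_refl _)]
      simp
    have h3 : t[u.length]? = some c := by rw [this, h2]
    exact hc (List.mem_of_getElem? h3)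

theorem pvInfixSplit (t v : List Char) (c : Char) (hc : c ∉ t) :
    ∀ u : List Char, t <:+: u ++ c :: v → t <:+: u ∨ t <:+: v := by
  intro u
  induction u with
  | nil =>
    intro h
    rcases List.infix_cons_iff.mp h with h | h
    · left
      have := pvPrefixSplit t [] v c hc (by simpa using h)
      simpa using this.isInfix
    · right; exact h
  | cons x xs ih =>
    intro h
    rcases List.infix_cons_iff.mp (by simpa using h) with h | h
    · left
      have : t <+: (x :: xs) ++ c :: v := by simpa using h
      exact (pvPrefixSplit t (x :: xs) v c hc this).isInfix
    · rcases ih h with h' | h'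
      · left; exact h'.trans (List.suffix_cons x xs).isInfix
      · right; exact h'

theorem pvInfixIntercalate (t : List Char) (ht : t ≠ []) (hc : ' ' ∉ t) :
    ∀ ws : List (List Char), t <:+: List.intercalate [' '] ws ↔ ∃ w ∈ ws, t <:+: w := by
  intro ws
  induction ws with
  | nil =>
    simp [List.intercalate]
    intro h
    exact ht h
  | cons w rest ih =>
    cases rest with
    | nil =>
      simp [List.intercalate]
    | cons w' rest' =>
      have hstep : List.intercalate [' '] (w :: w' :: rest') = w ++ ' ' :: List.intercalate [' '] (w' :: rest') := by
        simp [List.intercalate]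
      rw [hstep]
      constructor
      · intro h
        rcases pvInfixSplit t _ ' ' hc w h with h' | h'
        · exact ⟨w, by simp, h'⟩
        · rcases ih.mp h' with ⟨w2, hw2, h2⟩
          exact ⟨w2, by simp [hw2], h2⟩
      · rintro ⟨w2, hw2, h2⟩
        rcases (by simpa using hw2 : w2 = w ∨ w2 ∈ w' :: rest') with rfl | hmem
        · exact h2.trans (List.prefix_append _ _).isInfix
        · have : t <:+: List.intercalate [' '] (w' :: rest') := ih.mpr ⟨w2, hmem, h2⟩
          exact this.trans ((List.suffix_cons ' ' _).isInfix.trans ((List.suffix_append w _).isInfix))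

theorem pvMapIntercalate (f : Char → Char) (sep : List Char) (l : List (List Char)) :
    List.map f (List.intercalate sep l) = List.intercalate (List.map f sep) (l.map (List.map f)) := by
  induction l with
  | nil => simp [List.intercalate]
  | cons x xs ih => cases xs <;> simp_all [List.intercalate]

-- a whitespace-free token is in the lowered joined window iff it is in some lowered word of it
theorem pvCond (t : String) (hne : t.toList ≠ [])
    (hsp : ∀ c ∈ t.toList, PySem.Chars.isspace c = false) (ws : List String) :
    PySem.Str.isIn t (PySem.Str.lower (PySem.Str.join " " ws))
      = ws.any (fun w => PySem.Str.isIn t (PySem.Str.lower w)) := by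
  have hc : ' ' ∉ t.toList := by
    intro h
    have := hsp ' ' h
    simp [PySem.Chars.isspace] at this
  have hiff :
      PySem.Str.isIn t (PySem.Str.lower (PySem.Str.join " " ws)) = true
        ↔ (ws.any (fun w => PySem.Str.isIn t (PySem.Str.lower w))) = true := by
    rw [PySem.Str.isIn_eq, PySem.Str.toList_lower, PySem.Str.toList_join]
    have hsep : (" " : String).toList = [' '] := rfl
    rw [hsep]
    have hjoin : PySem.Chars.join [' '] (ws.map String.toList) = List.intercalate [' '] (ws.map String.toList) := rfl
    rw [hjoin]
    have hlow : PySem.Chars.lower (List.intercalate [' '] (ws.map String.toList))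
        = List.intercalate [' '] ((ws.map String.toList).map PySem.Chars.lower) := by
      have := pvMapIntercalate PySem.Chars.lowerChar [' '] (ws.map String.toList)
      simpa [PySem.Chars.lower] using this
    rw [hlow, PySem.Chars.isIn_iff_infix, pvInfixIntercalate t.toList hne hc]
    simp only [List.any_eq_true, List.mem_map]
    constructor
    · rintro ⟨w2, ⟨a, ⟨w3, hw3, rfl⟩, rfl⟩, h2⟩
      exact ⟨w3, hw3, by rw [PySem.Str.isIn_eq, PySem.Str.toList_lower, PySem.Chars.isIn_iff_infix]; exact h2⟩
    · rintro ⟨w3, hw3, h3⟩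
      rw [PySem.Str.isIn_eq, PySem.Str.toList_lower, PySem.Chars.isIn_iff_infix] at h3
      exact ⟨PySem.Chars.lower w3.toList, ⟨w3.toList, ⟨w3, hw3, rfl⟩, rfl⟩, h3⟩
  exact Bool.coe_iff_coe.mp hiff

-- proof-side names for the pieces shared by the two ports
def pvScoreA (terms words : List String) (i : Int) : Int :=
  (terms.map (fun term => if PySem.Str.isIn term (PySem.Str.lower (PySem.Str.join " " (PySem.List.slice words (some i) (some (i + 10))))) then (1 : Int) else 0)).sum

def pvStarts (words : List String) (m : Int) (t : String) : PySem.Set Int :=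
  (PySem.List.enumerate words).foldl
    (fun st pw =>
      if PySem.Str.isIn t (PySem.Str.lower pw.2) then
        PySem.Set.update st (PySem.List.pyRange (max (pw.1 - 9) 0) (min pw.1 (m - 1) + 1) 1)
      else st)
    PySem.Set.empty

def pvTail (terms words : List String) (text : String) (bs bc : Int) : String :=
  if bc > 0 then
    "..." ++ (terms.foldl (fun s term => PySem.Str.replace s term ("**" ++ term ++ "**"))
      (PySem.Str.join " " (PySem.List.slice words (some bs) (some (bs + 20))))) ++ "..."
  else
    PySem.Str.slice text none (some 200) ++ "..."

-- membership in the starts-set fold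
theorem pvMemStartsFold (c : Int × String → Bool) (r : Int × String → List Int) (x : Int) :
    ∀ (l : List (Int × String)) (st : PySem.Set Int),
      (x ∈ l.foldl (fun st pw => if c pw then PySem.Set.update st (r pw) else st) st
        ↔ x ∈ st ∨ ∃ pw ∈ l, c pw ∧ x ∈ r pw) := by
  intro l
  induction l with
  | nil => simp
  | cons pw l ih =>
    intro st
    simp only [List.foldl_cons]
    by_cases h : c pw = true
    · rw [if_pos h, ih, PySem.Set.mem_update]
      constructor
      · rintro (⟨h1 | h1⟩ | ⟨q, hq, hcq, hx⟩)
        · exact Or.inl h1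
        · exact Or.inr ⟨pw, by simp, h, h1⟩
        · exact Or.inr ⟨q, by simp [hq], hcq, hx⟩
      · rintro (h1 | ⟨q, hq, hcq, hx⟩)
        · exact Or.inl (Or.inl h1)
        · rcases (by simpa using hq : q = pw ∨ q ∈ l) with rfl | hq'
          · exact Or.inl (Or.inr hx)
          · exact Or.inr ⟨q, hq', hcq, hx⟩
    · rw [if_neg h, ih]
      constructor
      · rintro (h1 | ⟨q, hq, hcq, hx⟩)
        · exact Or.inl h1
        · exact Or.inr ⟨q, by simp [hq], hcq, hx⟩
      · rintro (h1 | ⟨q, hq, hcq, hx⟩)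
        · exact Or.inl h1
        · rcases (by simpa using hq : q = pw ∨ q ∈ l) with rfl | hq'
          · exact absurd hcq (by simp [h])
          · exact Or.inr ⟨q, hq', hcq, hx⟩

theorem pvNodupStartsFold (c : Int × String → Bool) (r : Int × String → List Int) :
    ∀ (l : List (Int × String)) (st : PySem.Set Int), st.Nodup →
      (l.foldl (fun st pw => if c pw then PySem.Set.update st (r pw) else st) st).Nodup := by
  intro l
  induction l with
  | nil => intro st h; simpa using h
  | cons pw l ih =>
    intro st h
    simp only [List.foldl_cons]
    by_cases hc : c pw = true
    · rw [if_pos hc]; exact ih _ (PySem.Set.nodup_update st (r pw) h)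
    · rw [if_neg hc]; exact ih _ h

theorem pvMemStarts (words : List String) (m : Int) (t : String) (x : Int) :
    x ∈ pvStarts words m t ↔
      ∃ (k : Nat) (h : k < words.length),
        PySem.Str.isIn t (PySem.Str.lower words[k]) = true ∧
        max ((k : Int) - 9) 0 ≤ x ∧ x < min (k : Int) (m - 1) + 1 := by
  unfold pvStarts
  rw [pvMemStartsFold]
  simp only [PySem.Set.empty, List.not_mem_nil, false_or]
  constructor
  · rintro ⟨pw, hpw, hcpw, hx⟩
    rcases (PySem.List.mem_enumerate_iff words 0 pw).mp hpw with ⟨k, hk, rfl⟩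
    rw [PySem.List.mem_pyRange_one] at hx
    exact ⟨k, hk, by simpa using hcpw, by simpa using hx.1, by simpa using hx.2⟩
  · rintro ⟨k, hk, hc, h1, h2⟩
    refine ⟨((0 : Int) + (k : Int), words[k]), (PySem.List.mem_enumerate_iff words 0 _).mpr ⟨k, hk, rfl⟩, by simpa using hc, ?_⟩
    rw [PySem.List.mem_pyRange_one]
    constructor
    · simpa using h1
    · simpa using h2

theorem pvNonnegStarts (words : List String) (m : Int) (t : String) :
    ∀ x ∈ pvStarts words m t, 0 ≤ x := by
  intro x hx
  rcases (pvMemStarts words m t x).mp hx with ⟨k, hk, _, h1, _⟩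
  have : (0 : Int) ≤ max ((k : Int) - 9) 0 := le_max_right _ _
  omega

theorem pvNodupStarts (words : List String) (m : Int) (t : String) :
    (pvStarts words m t).Nodup := by
  unfold pvStarts
  exact pvNodupStartsFold _ _ _ _ (by simp [PySem.Set.empty])

-- the scatter loop: each distinct nonnegative index in S gets +1
theorem pvScatter : ∀ (S : List Int), S.Nodup → (∀ x ∈ S, 0 ≤ x) → ∀ (sc : List Int),
    (S.foldl (fun sc i => PySem.List.pySetD sc i (PySem.List.pyGetD sc i 0 + 1)) sc).length = sc.length ∧
    ∀ j : Nat, j < sc.length →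
      (S.foldl (fun sc i => PySem.List.pySetD sc i (PySem.List.pyGetD sc i 0 + 1)) sc).getD j 0
        = sc.getD j 0 + (if (j : Int) ∈ S then 1 else 0) := by
  intro S
  induction S with
  | nil => intro _ _ sc; simp
  | cons i S ih =>
    intro hnd hnn sc
    have hi : 0 ≤ i := hnn i (by simp)
    simp only [List.foldl_cons]
    have hset : PySem.List.pySetD sc i (PySem.List.pyGetD sc i 0 + 1)
        = sc.set i.toNat (PySem.List.pyGetD sc i 0 + 1) := PySem.List.pySetD_of_nonneg sc _ hi
    have hlen : (sc.set i.toNat (PySem.List.pyGetD sc i 0 + 1)).length = sc.length := by simp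
    obtain ⟨ihl, ihg⟩ := ih (List.nodup_cons.mp hnd).2 (fun x hx => hnn x (by simp [hx]))
      (sc.set i.toNat (PySem.List.pyGetD sc i 0 + 1))
    refine ⟨by rw [hset, ihl, hlen], ?_⟩
    intro j hj
    rw [hset, ihg j (by rw [hlen]; exact hj)]
    have hiS : i ∉ S := (List.nodup_cons.mp hnd).1
    by_cases hji : (j : Int) = i
    · have hit : i.toNat = j := by omega
      have hget : PySem.List.pyGetD sc i 0 = sc.getD j 0 := by
        rw [← hji, PySem.List.pyGetD_natCast]
      have hsd : (sc.set i.toNat (PySem.List.pyGetD sc i 0 + 1)).getD j 0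
          = PySem.List.pyGetD sc i 0 + 1 := by
        rw [hit]
        simp [List.getD, hj]
      rw [hsd, hget, if_neg (fun h : (j:Int) ∈ S => hiS (hji ▸ h)),
        if_pos (show (j:Int) ∈ i :: S by simp [hji])]
      ring
    · have hne : i.toNat ≠ j := by omega
      have hsd : (sc.set i.toNat (PySem.List.pyGetD sc i 0 + 1)).getD j 0 = sc.getD j 0 := by
        simp [List.getD, List.getElem?_set_ne hne]
      rw [hsd]
      have hmm : ((j : Int) ∈ i :: S) ↔ ((j : Int) ∈ S) := by simp [hji]
      simp only [hmm]
  
-- the per-term accumulation: final score[j] counts the terms whose starts-set contains j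
theorem pvScoreFold (words : List String) (m : Int) :
    ∀ (ts : List String) (sc : List Int),
      ((ts.foldl (fun sc t => (pvStarts words m t).foldl
          (fun sc i => PySem.List.pySetD sc i (PySem.List.pyGetD sc i 0 + 1)) sc) sc).length = sc.length) ∧
      ∀ j : Nat, j < sc.length →
        (ts.foldl (fun sc t => (pvStarts words m t).foldl
          (fun sc i => PySem.List.pySetD sc i (PySem.List.pyGetD sc i 0 + 1)) sc) sc).getD j 0
          = sc.getD j 0 + (ts.map (fun t => if (j : Int) ∈ pvStarts words m t then (1 : Int) else 0)).sum := by
  intro ts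
  induction ts with
  | nil => intro sc; simp
  | cons t ts ih =>
    intro sc
    simp only [List.foldl_cons]
    obtain ⟨sl, sg⟩ := pvScatter (pvStarts words m t) (pvNodupStarts words m t) (pvNonnegStarts words m t) sc
    obtain ⟨ihl, ihg⟩ := ih ((pvStarts words m t).foldl
      (fun sc i => PySem.List.pySetD sc i (PySem.List.pyGetD sc i 0 + 1)) sc)
    refine ⟨by rw [ihl, sl], ?_⟩
    intro j hj
    rw [ihg j (by rw [sl]; exact hj), sg j hj]
    simp only [List.map_cons, List.sum_cons]
    ring

-- window membership: j ∈ starts t iff some word of window j matches t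
theorem pvWindowIff (words : List String) (m : Int) (hm : m = (words.length : Int) - 5)
    (t : String) (j : Nat) (hj : (j : Int) < m) :
    ((j : Int) ∈ pvStarts words m t) ↔
      (PySem.List.slice words (some (j : Int)) (some ((j : Int) + 10))).any
        (fun w => PySem.Str.isIn t (PySem.Str.lower w)) = true := by
  have hslice : PySem.List.slice words (some (j : Int)) (some ((j : Int) + 10))
      = (words.drop j).take 10 := by
    have : (j : Int) + 10 = ((10 : Nat) : Int) + (j : Int) := by push_cast; ring
    rw [this, add_comm ((10:Nat):Int) (j:Int)]
    exact_mod_cast PySem.List.slice_natCast_add words j 10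
  rw [pvMemStarts, hslice]
  simp only [List.any_eq_true]
  constructor
  · rintro ⟨k, hk, hc, h1, h2⟩
    refine ⟨words[k], ?_, hc⟩
    have hjk : j ≤ k ∧ k < j + 10 := by
      constructor <;> omega
    rw [List.mem_iff_getElem]
    refine ⟨k - j, ?_, ?_⟩
    · simp only [List.length_take, List.length_drop]
      omega
    · rw [List.getElem_take, List.getElem_drop]
      congr 1
      omega
  · rintro ⟨w, hw, hc⟩
    rw [List.mem_iff_getElem] at hw
    obtain ⟨kk, hkk, hkw⟩ := hw
    simp only [List.length_take, List.length_drop] at hkk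
    rw [List.getElem_take, List.getElem_drop] at hkw
    refine ⟨j + kk, by omega, by rw [hkw]; exact hc, ?_, ?_⟩
    · have : (0:Int) ≤ max (((j+kk:Nat) : Int) - 9) 0 := le_max_right _ _
      push_cast
      omega
    · push_cast
      omega

-- pyGetD of the score list equals A's window score, on the scanned range
theorem pvScoreEq (query text : String) (i : Int)
    (hi : i ∈ PySem.List.pyRange 0 (((PySem.Str.split₀ text).length : Int) - 5) 1) :
    PySem.List.pyGetD
      ((PySem.Str.split₀ (PySem.Str.lower query)).foldl
        (fun sc t => (pvStarts (PySem.Str.split₀ text) (((PySem.Str.split₀ text).length : Int) - 5) t).foldl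
          (fun sc i => PySem.List.pySetD sc i (PySem.List.pyGetD sc i 0 + 1)) sc)
        (List.replicate ((((PySem.Str.split₀ text).length : Int) - 5)).toNat 0)) i 0
      = pvScoreA (PySem.Str.split₀ (PySem.Str.lower query)) (PySem.Str.split₀ text) i := by
  set terms := PySem.Str.split₀ (PySem.Str.lower query) with hterms
  set words := PySem.Str.split₀ text with hwords
  set m : Int := ((words.length : Int) - 5) with hm
  rw [PySem.List.mem_pyRange_one] at hi
  obtain ⟨hi0, him⟩ := hi
  set j : Nat := i.toNat with hjdef
  have hij : i = (j : Int) := by omega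
  have hjm : (j : Int) < m := by omega
  have hjlen : j < (List.replicate m.toNat (0:Int)).length := by
    simp only [List.length_replicate]
    omega
  obtain ⟨_, hg⟩ := pvScoreFold words m terms (List.replicate m.toNat 0)
  rw [hij, PySem.List.pyGetD_natCast, hg j hjlen]
  have hz : (List.replicate m.toNat (0:Int)).getD j 0 = 0 := by
    simp only [List.getD, List.getElem?_replicate]
    split_ifs <;> simp
  rw [hz, zero_add]
  unfold pvScoreA
  refine congrArg List.sum (List.map_congr_left fun t ht => ?_)
  have htl : t.toList ∈ PySem.Chars.split₀ (PySem.Str.lower query).toList := by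
    rw [← PySem.Str.split₀_map_toList]
    exact List.mem_map_of_mem ht
  obtain ⟨hne, hsp⟩ := pvTok _ _ htl
  rw [pvCond t hne hsp]
  have := pvWindowIff words m hm t j hjm
  by_cases hmem : (j : Int) ∈ pvStarts words m t
  · rw [if_pos hmem, if_pos (this.mp hmem)]
  · rw [if_neg hmem, if_neg (by
      intro hc
      exact hmem (this.mpr hc))]

set_option maxHeartbeats 2000000 in
theorem pvMain (query text : String) :
    generate_highlight_py query text = generate_highlight_py_alt query text := by
  set terms := PySem.Str.split₀ (PySem.Str.lower query) with hterms
  set words := PySem.Str.split₀ text with hwords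
  set m : Int := ((words.length : Int) - 5) with hm
  have hA : generate_highlight_py query text =
      pvTail terms words text
        (((PySem.List.pyRange 0 m 1).foldl
          (fun (p : Int × Int) i => if pvScoreA terms words i > p.2 then (i, pvScoreA terms words i) else p)
          ((0 : Int), (0 : Int))).1)
        (((PySem.List.pyRange 0 m 1).foldl
          (fun (p : Int × Int) i => if pvScoreA terms words i > p.2 then (i, pvScoreA terms words i) else p)
          ((0 : Int), (0 : Int))).2) := rfl
  have hB : generate_highlight_py_alt query text =
      pvTail terms words text
        (((PySem.List.pyRange 0 m 1).foldl
          (fun (p : Int × Int) i =>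
            if PySem.List.pyGetD (terms.foldl
                (fun sc t => (pvStarts words m t).foldl
                  (fun sc i => PySem.List.pySetD sc i (PySem.List.pyGetD sc i 0 + 1)) sc)
                (List.replicate m.toNat 0)) i 0 > p.2
            then (i, PySem.List.pyGetD (terms.foldl
                (fun sc t => (pvStarts words m t).foldl
                  (fun sc i => PySem.List.pySetD sc i (PySem.List.pyGetD sc i 0 + 1)) sc)
                (List.replicate m.toNat 0)) i 0)
            else p)
          ((0 : Int), (0 : Int))).1)
        (((PySem.List.pyRange 0 m 1).foldl
          (fun (p : Int × Int) i =>
            if PySem.List.pyGetD (terms.foldl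
                (fun sc t => (pvStarts words m t).foldl
                  (fun sc i => PySem.List.pySetD sc i (PySem.List.pyGetD sc i 0 + 1)) sc)
                (List.replicate m.toNat 0)) i 0 > p.2
            then (i, PySem.List.pyGetD (terms.foldl
                (fun sc t => (pvStarts words m t).foldl
                  (fun sc i => PySem.List.pySetD sc i (PySem.List.pyGetD sc i 0 + 1)) sc)
                (List.replicate m.toNat 0)) i 0)
            else p)
          ((0 : Int), (0 : Int))).2) := rfl
  rw [hA, hB]
  have hfold : (PySem.List.pyRange 0 m 1).foldl
      (fun (p : Int × Int) i => if pvScoreA terms words i > p.2 then (i, pvScoreA terms words i) else p)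
      ((0 : Int), (0 : Int))
      = (PySem.List.pyRange 0 m 1).foldl
      (fun (p : Int × Int) i =>
        if PySem.List.pyGetD (terms.foldl
            (fun sc t => (pvStarts words m t).foldl
              (fun sc i => PySem.List.pySetD sc i (PySem.List.pyGetD sc i 0 + 1)) sc)
            (List.replicate m.toNat 0)) i 0 > p.2
        then (i, PySem.List.pyGetD (terms.foldl
            (fun sc t => (pvStarts words m t).foldl
              (fun sc i => PySem.List.pySetD sc i (PySem.List.pyGetD sc i 0 + 1)) sc)
            (List.replicate m.toNat 0)) i 0)
        else p)
      ((0 : Int), (0 : Int)) := by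
    refine PySem.List.foldl_congr_mem _ _ _ _ ?_
    intro acc x hx
    rw [hterms, hwords, hm] at *
    rw [pvScoreEq query text x hx]
  rw [hfold]

-- ===== VERDICT (by name: the statement is the Claim_ definition above) =====
theorem generate_highlight_py_spec : Claim_equal_generate_highlight_py := by
  intro query text _
  exact pvMain query text
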